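-- pv_equiv track=rewrite | github.com/DAIDASEN/VisFactor | visfactor/utils/MA1.py | _best_grid
-- ===== SOURCE A (Python) =====
-- import math
-- from typing import Tuple, List, Optional
--
-- def _best_grid(n: int) -> Tuple[int, int]:
--     root = int(math.sqrt(n))
--     rows, cols = root, root
--     if rows * cols < n:
--         cols += 1
--     while rows * cols < n:
--         rows += 1 if cols > rows else 0
--         cols += 1 if rows > cols else 0
--     return rows, cols
-- ===== SOURCE B (Python) =====
-- import math
-- from typing import Tuple
--
-- def _best_grid(n: int) -> Tuple[int, int]:
--     root = int(math.sqrt(n))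
--     if root * root >= n:
--         return root, root
--     if root * (root + 1) >= n:
--         return root, root + 1
--     return root + 1, root + 1
-- ===== Notes on version B (the rewrite author's own statement) =====
-- stated objective: simpler
-- what changed: Replaces A's alternating-increment while loop with a direct closed-form choice among the two near-square candidates (root,root), (root,root+1), (root+1,root+1).
import Mathlib
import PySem

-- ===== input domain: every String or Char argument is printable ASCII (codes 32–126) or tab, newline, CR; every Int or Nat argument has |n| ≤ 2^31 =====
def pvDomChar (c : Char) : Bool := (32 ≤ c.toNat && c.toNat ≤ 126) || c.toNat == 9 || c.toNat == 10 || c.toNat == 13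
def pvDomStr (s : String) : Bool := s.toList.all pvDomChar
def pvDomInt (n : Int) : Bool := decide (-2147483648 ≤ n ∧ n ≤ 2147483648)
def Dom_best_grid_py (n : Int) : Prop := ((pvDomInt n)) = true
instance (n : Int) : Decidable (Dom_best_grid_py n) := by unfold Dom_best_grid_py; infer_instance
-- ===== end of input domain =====

-- B replaces A's alternating-increment while loop by a closed-form choice among the two
-- near-square candidates; same return values, objective: simpler.

-- ===== PORT A =====
-- the while loop, transliterated with fuel (the fuel only makes the recursion total;
-- on every admitted input the loop runs at most one iteration)
def bestGridLoop (n : Int) : Nat → Int → Int → Int × Int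
  | 0, rows, cols => (rows, cols)
  | fuel + 1, rows, cols =>
    if rows * cols < n then
      let rows' := rows + (if cols > rows then 1 else 0)
      let cols' := cols + (if rows' > cols then 1 else 0)
      bestGridLoop n fuel rows' cols'
    else (rows, cols)

def best_grid_py (n : Int) : Int × Int :=
  let root : Int := Int.sqrt n     -- int(math.sqrt(n)); exact integer sqrt on |n| ≤ 2^31
  let rows := root
  let cols := root
  let cols := if rows * cols < n then cols + 1 else cols
  bestGridLoop n (n.toNat + 2) rows cols

-- ===== PORT B =====
def best_grid_py_alt (n : Int) : Int × Int :=
  let root : Int := Int.sqrt n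
  if root * root ≥ n then (root, root)
  else if root * (root + 1) ≥ n then (root, root + 1)
  else (root + 1, root + 1)

-- ===== PRECONDITION & SPEC =====
-- Pre_ excludes n < 0, where Python's math.sqrt raises ValueError.
def Pre_best_grid_py (n : Int) : Prop := 0 ≤ n
instance (n : Int) : Decidable (Pre_best_grid_py n) := by unfold Pre_best_grid_py; infer_instance
def pvWitness_best_grid_py : Int := (7)

def Spec_best_grid_py (n : Int) (out : Int × Int) : Prop := out = best_grid_py_alt n
instance (n : Int) (out : Int × Int) : Decidable (Spec_best_grid_py n out) := by unfold Spec_best_grid_py; infer_instance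

-- ===== CLAIM (what is proved, stated in full; the proofs are below) =====
def Claim_equal_best_grid_py : Prop := ∀ (n : Int), Dom_best_grid_py n → Pre_best_grid_py n → Spec_best_grid_py n (best_grid_py n)

-- ===== LEMMAS AND PROOFS =====

theorem sqrt_sq_le (n : Int) (h : 0 ≤ n) : Int.sqrt n * Int.sqrt n ≤ n := by
  have hnat := Nat.sqrt_le' n.toNat
  have : ((Nat.sqrt n.toNat : Int)) * (Nat.sqrt n.toNat : Int) ≤ (n.toNat : Int) := by
    have := hnat; rw [pow_two] at this; exact_mod_cast this
  simpa [Int.sqrt, Int.toNat_of_nonneg h] using this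

theorem lt_succ_sqrt_sq (n : Int) (h : 0 ≤ n) : n < (Int.sqrt n + 1) * (Int.sqrt n + 1) := by
  have hnat := Nat.lt_succ_sqrt' n.toNat
  have : ((n.toNat : Int)) < ((Nat.sqrt n.toNat : Int) + 1) * ((Nat.sqrt n.toNat : Int) + 1) := by
    have := hnat; rw [pow_two, Nat.succ_eq_add_one] at this; exact_mod_cast this
  simpa [Int.sqrt, Int.toNat_of_nonneg h] using this

-- ===== VERDICT (by name: the statement is the Claim_ definition above) =====
theorem best_grid_py_spec : Claim_equal_best_grid_py := by
  intro n _ hn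
  unfold Spec_best_grid_py best_grid_py best_grid_py_alt
  set r := Int.sqrt n with hr
  have hle : r * r ≤ n := sqrt_sq_le n hn
  have hlt : n < (r + 1) * (r + 1) := lt_succ_sqrt_sq n hn
  by_cases h1 : r * r < n
  · -- cols becomes r + 1
    simp only [h1, if_true]
    by_cases h2 : r * (r + 1) < n
    · -- one loop iteration: (r, r+1) → (r+1, r+1), then stop
      have hstep : (r : Int) + 1 > r := by omega
      have hstop : ¬ ((r + 1) * (r + 1) < n) := not_lt.mpr (le_of_lt hlt)
      have hfuel : n.toNat + 2 = (n.toNat + 1) + 1 := rfl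
      rw [hfuel]
      unfold bestGridLoop
      simp only [h2, if_true, hstep, gt_iff_lt, lt_self_iff_false, if_false]
      unfold bestGridLoop
      simp [hstop, not_le.mpr h1, not_le.mpr h2]
    · -- loop condition false at (r, r+1)
      unfold bestGridLoop
      simp only [h2, if_false]
      have hge : r * (r + 1) ≥ n := not_lt.mp h2
      simp [not_le.mpr h1, hge]
  · -- loop never entered, result (r, r)
    unfold bestGridLoop
    simp only [h1, if_false]
    simp [not_lt.mp h1]
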